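-- pv_equiv track=rewrite | github.com/Lenidoxll/Find-multiplicities-task | bad_solutions.py | prefix_knapsack
-- ===== SOURCE A (Python) =====
-- def knapsack_single(w, S):
--     weight___is_possible = [not s % w for s in range(S + 1)]
--     return weight___is_possible
--
-- def prefix_knapsack(weights, S):
--     weights___is_possible = []
--     for w in weights:
--         if len(weights___is_possible) < 1:
--             weights___is_possible.append(knapsack_single(w, S))
--             continue
--         weights___is_possible.append([False] * (S + 1) )
--         for s in range(S + 1):
--             weights___is_possible[-1][s] = weights___is_possible[-2][s] or weights___is_possible[-1][s - w]
--     return weights___is_possible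
-- ===== SOURCE B (Python) =====
-- def prefix_knapsack(weights, S):
--     result = []
--     reach = None
--     for w in weights:
--         if reach is None:
--             reach = {s for s in range(S + 1) if s % w == 0}
--         elif w:
--             new = set()
--             for r in sorted(reach):
--                 if r not in new:
--                     new.update(range(r, S + 1, w))
--             reach = new
--         result.append([s in reach for s in range(S + 1)])
--     return result
-- ===== Notes on version B (the rewrite author's own statement) =====
-- stated objective: alternative
-- what changed: B abandons A's 2-D boolean DP table entirely: it maintains the SET of reachable sums, expanding it per weight w>0 by a covering pass over the sorted set that unions the arithmetic progression r, r+w, ... <= S from each not-yet-covered reachable r, and materialises each snapshot row only as a membership test over range(S+1).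
-- outside the precondition, e.g. on prefix_knapsack([0], 0): A raises ZeroDivisionError, B raises ZeroDivisionError; on prefix_knapsack([1, -1], 0): A returns [[True], [True]], B returns [[True], [False]]; on prefix_knapsack([2, -1], 1): A raises IndexError, B returns [[True, False], [False, False]]
import Mathlib
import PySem

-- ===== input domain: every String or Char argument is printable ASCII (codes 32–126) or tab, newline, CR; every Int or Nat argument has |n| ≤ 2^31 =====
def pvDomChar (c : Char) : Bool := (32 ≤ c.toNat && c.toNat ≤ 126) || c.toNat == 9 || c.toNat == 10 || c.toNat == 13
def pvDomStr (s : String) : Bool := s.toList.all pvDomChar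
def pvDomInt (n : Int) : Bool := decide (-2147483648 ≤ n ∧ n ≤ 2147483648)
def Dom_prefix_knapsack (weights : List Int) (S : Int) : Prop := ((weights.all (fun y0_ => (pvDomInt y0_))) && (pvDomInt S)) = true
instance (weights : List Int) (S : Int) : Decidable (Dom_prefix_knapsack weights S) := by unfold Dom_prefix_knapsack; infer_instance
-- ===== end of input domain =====

-- B replaces A's 2-D boolean DP table by a SET of reachable sums, expanded per positive
-- weight w by the union of arithmetic progressions r, r+w, … ≤ S from each reachable r,
-- with each output row materialised as a membership test; equivalence is about return
-- values (A mutates only its own fresh lists, no argument is mutated).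

-- ===== PORT A =====
def knapsack_single (w S : Int) : List Bool :=
  -- [not s % w for s in range(S + 1)]
  (PySem.List.pyRange 0 (S + 1) 1).map (fun s => decide (PySem.Int.mod s w = 0))

-- the in-place loop `for s in range(S+1): row[s] = prev[s] or row[s-w]` on the freshly
-- appended row `[False]*(S+1)` (in-place mutation modelled by threading the row; `prev`
-- is `weights___is_possible[-2]` after the append)
def pkRowA (prev : List Bool) (w S : Int) : List Bool :=
  (PySem.List.pyRange 0 (S + 1) 1).foldl
    (fun row s =>
      PySem.List.pySetD row s
        (PySem.List.pyGetD prev s false || PySem.List.pyGetD row (s - w) false))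
    (PySem.List.pyRepeat [false] (S + 1))

def prefix_knapsack (weights : List Int) (S : Int) : List (List Bool) :=
  weights.foldl
    (fun acc w =>
      if acc.length < 1 then acc ++ [knapsack_single w S]
      else acc ++ [pkRowA (PySem.List.pyGetD acc (-1) []) w S])
    []

-- ===== PORT B =====
-- {s for s in range(S + 1) if s % w == 0}
def pkFirstSet (w S : Int) : PySem.Set Int :=
  PySem.Set.ofList ((PySem.List.pyRange 0 (S + 1) 1).filter (fun s => decide (PySem.Int.mod s w = 0)))

-- new = set(); for r in sorted(reach): if r not in new: new.update(range(r, S + 1, w))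
def pkStepSet (reach : PySem.Set Int) (w S : Int) : PySem.Set Int :=
  (PySem.List.sorted reach (fun x => x) false).foldl
    (fun new r =>
      if PySem.Set.contains new r then new
      else PySem.Set.update new (PySem.List.pyRange r (S + 1) w))
    PySem.Set.empty

-- [s in reach for s in range(S + 1)]
def pkSnapshot (reach : PySem.Set Int) (S : Int) : List Bool :=
  (PySem.List.pyRange 0 (S + 1) 1).map (fun s => PySem.Set.contains reach s)

def prefix_knapsack_alt (weights : List Int) (S : Int) : List (List Bool) :=
  (weights.foldl
    (fun (st : List (List Bool) × Option (PySem.Set Int)) w =>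
      let reach := match st.2 with
        | none => pkFirstSet w S
        | some r => if w ≠ 0 then pkStepSet r w S else r
      (st.1 ++ [pkSnapshot reach S], some reach))
    (([], none) : List (List Bool) × Option (PySem.Set Int))).1

-- ===== PRECONDITION & SPEC =====
-- Pre_ excludes the S ≥ 0 inputs whose first weight is 0 (A raises ZeroDivisionError) and
-- those with a later weight outside [0, S+1]: there A's negative-index read into the
-- half-built row raises IndexError on most such inputs, and where boolean short-circuiting
-- happens to avoid the bad read A silently ignores that weight — which of the two occurs
-- depends on the DP values themselves, so no closed-form predicate separates them.
def Pre_prefix_knapsack (weights : List Int) (S : Int) : Prop :=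
  S < 0 ∨ (weights.head? ≠ some 0 ∧ ∀ w ∈ weights.tail, 0 ≤ w ∧ w ≤ S + 1)
instance (weights : List Int) (S : Int) : Decidable (Pre_prefix_knapsack weights S) := by
  unfold Pre_prefix_knapsack; infer_instance

def pvWitness_prefix_knapsack : List Int × Int := ([2, 3, 2], 6)

def Spec_prefix_knapsack (weights : List Int) (S : Int) (out : List (List Bool)) : Prop := out = prefix_knapsack_alt weights S
instance (weights : List Int) (S : Int) (out : List (List Bool)) : Decidable (Spec_prefix_knapsack weights S out) := by unfold Spec_prefix_knapsack; infer_instance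

-- ===== CLAIM (what is proved, stated in full; the proofs are below) =====
def Claim_equal_prefix_knapsack : Prop := ∀ (weights : List Int) (S : Int), Dom_prefix_knapsack weights S → Pre_prefix_knapsack weights S → Spec_prefix_knapsack weights S (prefix_knapsack weights S)

-- ===== LEMMAS AND PROOFS =====

-- the common DP value of row entry p (wn = the weight, as a Nat)
def pkF (prev : List Bool) (wn : Nat) (p : Nat) : Bool :=
  if _h : 1 ≤ wn ∧ wn ≤ p then prev.getD p false || pkF prev wn (p - wn)
  else prev.getD p false
termination_by p
decreasing_by omega

lemma pkF_unfold (prev : List Bool) (wn p : Nat) :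
    pkF prev wn p
      = if 1 ≤ wn ∧ wn ≤ p then prev.getD p false || pkF prev wn (p - wn)
        else prev.getD p false := by
  rw [pkF]; split_ifs <;> rfl

lemma map_range_getD (xs : List Bool) :
    (List.range xs.length).map (fun p => xs.getD p false) = xs := by
  apply List.ext_getElem
  · simp
  · intro i h1 h2
    simp [List.getD_eq_getElem?_getD, List.getElem?_eq_getElem h2]

lemma pk_invA (prev : List Bool) (L wn : Nat) (hwn : wn ≤ L) (k : Nat) (hk : k ≤ L) :
    (PySem.List.pyRange 0 (k : Int) 1).foldl
      (fun row s => PySem.List.pySetD row s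
        (PySem.List.pyGetD prev s false || PySem.List.pyGetD row (s - (wn : Int)) false))
      (List.replicate L false)
    = (List.range L).map (fun p => if p < k then pkF prev wn p else false) := by
  induction k with
  | zero =>
    rw [PySem.List.pyRange_one_eq_nil (by simp)]
    simp [List.foldl_nil, List.map_const']
  | succ k ih =>
    have hk' : k ≤ L := by omega
    have hcast : ((k + 1 : Nat) : Int) = (k : Int) + 1 := by push_cast; ring
    rw [hcast, PySem.List.pyRange_one_succ_right (by positivity), List.foldl_append,
      ih hk', List.foldl_cons, List.foldl_nil]
    set M := (List.range L).map (fun p => if p < k then pkF prev wn p else false) with hM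
    have hMlen : M.length = L := by simp [hM]
    have hval : (PySem.List.pyGetD prev (k : Int) false
        || PySem.List.pyGetD M ((k : Int) - (wn : Int)) false) = pkF prev wn k := by
      rw [PySem.List.pyGetD_natCast]
      by_cases hle : wn ≤ k
      · have hidx : (k : Int) - (wn : Int) = ((k - wn : Nat) : Int) := by omega
        rw [hidx, PySem.List.pyGetD_natCast, hM,
          PySem.List.getD_map_range _ _ _ _ (by omega)]
        conv_rhs => rw [pkF_unfold]
        rcases Nat.eq_zero_or_pos wn with hw0 | hw1
        · subst hw0
          simp
        · have h1 : k - wn < k := by omega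
          have h2 : 1 ≤ wn ∧ wn ≤ k := ⟨hw1, hle⟩
          simp [h1, h2]
      · have hlt : k < wn := by omega
        have hidx : (k : Int) - (wn : Int) = -(((wn - k : Nat) : Int)) := by omega
        rw [hidx, PySem.List.pyGetD_neg_natCast M (wn - k) false (by omega) (by omega)]
        have hge : ¬ (M.length - (wn - k) < k) := by omega
        have hz : M[M.length - (wn - k)]'(by omega) = false := by
          simp only [hM, List.getElem_map, List.getElem_range]
          rw [hMlen] at hge ⊢
          simp [hge]
        rw [hz, pkF_unfold]
        split_ifs with h'
        · omega
        · simp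
    rw [PySem.List.pySetD_natCast]
    apply List.ext_getElem
    · simp [hMlen]
    · intro i h1 h2
      rw [List.getElem_set]
      simp only [List.getElem_map, List.getElem_range] at h2 ⊢
      split_ifs with e1 e2 e2
      · rw [← e1, hval]
      · omega
      · simp only [hM, List.getElem_map, List.getElem_range]
        have hik : i < k := by omega
        simp [hik]
      · simp only [hM, List.getElem_map, List.getElem_range]
        have hik : ¬ i < k := by omega
        simp [hik]

-- A's row is the pointwise DP value pkF (for an admissible weight)
lemma pkRowA_eq_map (S w : Int) (prev : List Bool) (hS : 0 ≤ S)
    (hw0 : 0 ≤ w) (hw1 : w ≤ S + 1) :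
    pkRowA prev w S = (List.range (S + 1).toNat).map (pkF prev w.toNat) := by
  set L := (S + 1).toNat with hLdef
  set wn := w.toNat with hwndef
  have hL : ((L : Nat) : Int) = S + 1 := Int.toNat_of_nonneg (by omega)
  have hwcast : ((wn : Nat) : Int) = w := Int.toNat_of_nonneg hw0
  have hwn : wn ≤ L := by omega
  unfold pkRowA
  rw [PySem.List.pyRepeat_singleton, ← hL, ← hwcast]
  rw [Int.toNat_natCast]
  rw [pk_invA prev L wn hwn L le_rfl]
  apply List.map_congr_left
  intro p hp
  simp [List.mem_range.mp hp]

lemma pkRowA_neg (S w : Int) (hS : S < 0) (prev : List Bool) : pkRowA prev w S = [] := by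
  unfold pkRowA
  rw [PySem.List.pyRange_one_eq_nil (by omega : S + 1 ≤ (0 : Int)), List.foldl_nil,
    PySem.List.pyRepeat_singleton]
  have h0 : (S + 1).toNat = 0 := by omega
  simp [h0]

lemma pkSnapshot_neg (S : Int) (hS : S < 0) (reach : PySem.Set Int) :
    pkSnapshot reach S = [] := by
  unfold pkSnapshot
  rw [PySem.List.pyRange_one_eq_nil (by omega : S + 1 ≤ (0 : Int))]
  rfl

lemma pkSnapshot_eq_map (reach : PySem.Set Int) (S : Int) :
    pkSnapshot reach S
      = (List.range (S + 1).toNat).map (fun p : Nat => PySem.Set.contains reach (p : Int)) := by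
  unfold pkSnapshot
  rw [PySem.List.pyRange_one, List.map_map]
  simp only [sub_zero]
  apply List.map_congr_left
  intro p hp
  simp [Function.comp]

lemma contains_eq_mem {s : PySem.Set Int} {x : Int} :
    PySem.Set.contains s x = decide (x ∈ s) := by
  simp [PySem.Set.contains]

lemma snapshot_getD (reach : PySem.Set Int) (S : Int) (p : Nat) (hp : p < (S + 1).toNat) :
    (pkSnapshot reach S).getD p false = PySem.Set.contains reach (p : Int) := by
  rw [pkSnapshot_eq_map, PySem.List.getD_map_range _ _ _ _ hp]

-- characterisation of pkF over a snapshot row, positive weight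
lemma pkF_iff (reach : PySem.Set Int) (S : Int) (wn : Nat) (hwn : 1 ≤ wn) :
    ∀ p : Nat, p < (S + 1).toNat →
      (pkF (pkSnapshot reach S) wn p = true
        ↔ ∃ k : Nat, k * wn ≤ p ∧ ((p - k * wn : Nat) : Int) ∈ reach) := by
  intro p
  induction p using Nat.strong_induction_on with
  | _ p ih =>
    intro hp
    rw [pkF_unfold]
    by_cases hle : wn ≤ p
    · rw [if_pos ⟨hwn, hle⟩, snapshot_getD reach S p hp, Bool.or_eq_true,
        ih (p - wn) (by omega) (by omega), contains_eq_mem, decide_eq_true_iff]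
      constructor
      · rintro (h | ⟨k, hk1, hk2⟩)
        · exact ⟨0, by omega, by simpa using h⟩
        · refine ⟨k + 1, by rw [Nat.add_mul, Nat.one_mul]; omega, ?_⟩
          have heq : p - (k + 1) * wn = p - wn - k * wn := by
            rw [Nat.add_mul, Nat.one_mul]; omega
          rw [heq]; exact hk2
      · rintro ⟨k, hk1, hk2⟩
        cases k with
        | zero => exact Or.inl (by simpa using hk2)
        | succ k =>
          rw [Nat.add_mul, Nat.one_mul] at hk1
          refine Or.inr ⟨k, by omega, ?_⟩
          have heq : p - wn - k * wn = p - (k + 1) * wn := by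
            rw [Nat.add_mul, Nat.one_mul]; omega
          rw [heq]; exact hk2
    · rw [if_neg (by omega), snapshot_getD reach S p hp, contains_eq_mem, decide_eq_true_iff]
      constructor
      · intro h; exact ⟨0, by omega, by simpa using h⟩
      · rintro ⟨k, hk1, hk2⟩
        have hk0 : k = 0 := by
          by_contra hne
          have : wn ≤ k * wn := Nat.le_mul_of_pos_left wn (by omega)
          omega
        subst hk0; simpa using hk2

-- progressions are transitive: a member's progression stays inside the starter's
lemma prog_trans (w S a b x : Int) (hw : 0 < w)
    (hb : b ∈ PySem.List.pyRange a (S + 1) w) (hx : x ∈ PySem.List.pyRange b (S + 1) w) :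
    x ∈ PySem.List.pyRange a (S + 1) w := by
  rw [PySem.List.mem_pyRange_iff_of_pos hw] at hb hx ⊢
  obtain ⟨h1, h2, h3⟩ := hb
  obtain ⟨h4, h5, h6⟩ := hx
  refine ⟨by omega, h5, ?_⟩
  have := dvd_add h6 h3
  rwa [sub_add_sub_cancel] at this

-- membership after the covering fold: exactly the union of the starters' progressions
-- (skipping an already-covered starter loses nothing, since `new` stays closed)
lemma stepFold_mem (w S : Int) (hw : 0 < w) (l : List Int) (new : PySem.Set Int)
    (hcl : ∀ r ∈ new, ∀ x, x ∈ PySem.List.pyRange r (S + 1) w → x ∈ new) (x : Int) :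
    (x ∈ l.foldl
        (fun new r =>
          if PySem.Set.contains new r then new
          else PySem.Set.update new (PySem.List.pyRange r (S + 1) w))
        new)
      ↔ x ∈ new ∨ ∃ r ∈ l, x ∈ PySem.List.pyRange r (S + 1) w := by
  induction l generalizing new with
  | nil => simp
  | cons r l ih =>
    rw [List.foldl_cons]
    by_cases hc : PySem.Set.contains new r = true
    · rw [if_pos hc, ih new hcl]
      rw [contains_eq_mem, decide_eq_true_iff] at hc
      constructor
      · rintro (h | ⟨r', hr', hx⟩)
        · exact Or.inl h
        · exact Or.inr ⟨r', by simp [hr'], hx⟩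
      · rintro (h | ⟨r', hr', hx⟩)
        · exact Or.inl h
        · rcases List.mem_cons.mp hr' with heq | hr''
          · exact Or.inl (hcl r hc x (heq ▸ hx))
          · exact Or.inr ⟨r', hr'', hx⟩
    · rw [if_neg hc]
      have hcl' : ∀ a ∈ PySem.Set.update new (PySem.List.pyRange r (S + 1) w),
          ∀ x, x ∈ PySem.List.pyRange a (S + 1) w →
            x ∈ PySem.Set.update new (PySem.List.pyRange r (S + 1) w) := by
        intro a ha y hy
        rw [PySem.Set.mem_update] at ha ⊢
        rcases ha with ha | ha
        · exact Or.inl (hcl a ha y hy)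
        · exact Or.inr (prog_trans w S r a y hw ha hy)
      rw [ih _ hcl']
      constructor
      · rintro (h | ⟨r', hr', hx⟩)
        · rw [PySem.Set.mem_update] at h
          rcases h with h | h
          · exact Or.inl h
          · exact Or.inr ⟨r, by simp, h⟩
        · exact Or.inr ⟨r', by simp [hr'], hx⟩
      · rintro (h | ⟨r', hr', hx⟩)
        · exact Or.inl (by rw [PySem.Set.mem_update]; exact Or.inl h)
        · rcases List.mem_cons.mp hr' with heq | hr''
          · exact Or.inl (by rw [PySem.Set.mem_update]; exact Or.inr (heq ▸ hx))
          · exact Or.inr ⟨r', hr'', hx⟩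

lemma mem_stepSet (reach : PySem.Set Int) (w S x : Int) (hw : 0 < w) :
    x ∈ pkStepSet reach w S ↔ ∃ r ∈ reach, r ≤ x ∧ x < S + 1 ∧ w ∣ x - r := by
  unfold pkStepSet
  rw [stepFold_mem w S hw _ PySem.Set.empty (by intro r hr; cases hr) x]
  constructor
  · rintro (h | ⟨r, hr, hx⟩)
    · cases h
    · rw [PySem.List.mem_sorted] at hr
      rw [PySem.List.mem_pyRange_iff_of_pos hw] at hx
      exact ⟨r, hr, hx.1, hx.2.1, hx.2.2⟩
  · rintro ⟨r, hr, h1, h2, h3⟩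
    exact Or.inr ⟨r, (PySem.List.mem_sorted _ _ _ r).mpr hr,
      (PySem.List.mem_pyRange_iff_of_pos hw x).mpr ⟨h1, h2, h3⟩⟩

lemma mem_firstSet (w S x : Int) :
    x ∈ pkFirstSet w S ↔ (0 ≤ x ∧ x < S + 1) ∧ PySem.Int.mod x w = 0 := by
  unfold pkFirstSet
  rw [PySem.Set.mem_ofList, List.mem_filter, PySem.List.mem_pyRange_one]
  simp

lemma firstSet_bounds (w S : Int) : ∀ x ∈ pkFirstSet w S, 0 ≤ x ∧ x ≤ S := by
  intro x hx
  have := (mem_firstSet w S x).mp hx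
  omega

lemma stepSet_bounds (reach : PySem.Set Int) (w S : Int) (hw : 0 < w)
    (hreach : ∀ x ∈ reach, 0 ≤ x ∧ x ≤ S) :
    ∀ x ∈ pkStepSet reach w S, 0 ≤ x ∧ x ≤ S := by
  intro x hx
  obtain ⟨r, hr, h1, h2, _⟩ := (mem_stepSet reach w S x hw).mp hx
  have := hreach r hr
  omega

-- the per-weight step: A's row from the previous snapshot = B's snapshot of the new set
lemma step_eq (w S : Int) (reach : PySem.Set Int)
    (hreach : ∀ x ∈ reach, 0 ≤ x ∧ x ≤ S)
    (hw : S < 0 ∨ (0 ≤ w ∧ w ≤ S + 1)) :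
    pkRowA (pkSnapshot reach S) w S
      = pkSnapshot (if w ≠ 0 then pkStepSet reach w S else reach) S := by
  by_cases hS : S < 0
  · rw [pkRowA_neg S w hS, pkSnapshot_neg S hS]
  · rcases hw with h | ⟨hw0, hw1⟩
    · omega
    have hS' : (0 : Int) ≤ S := by omega
    by_cases hwz : w = 0
    · subst hwz
      simp only [ne_eq, not_true_eq_false, if_false]
      rw [pkRowA_eq_map S 0 _ hS' le_rfl (by omega)]
      have hlen : (pkSnapshot reach S).length = (S + 1).toNat := by
        rw [pkSnapshot_eq_map]; simp
      conv_rhs => rw [← map_range_getD (pkSnapshot reach S), hlen]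
      apply List.map_congr_left
      intro p hp
      rw [pkF_unfold]
      simp
    · simp only [ne_eq, hwz, not_false_eq_true, if_true]
      have hwpos : 0 < w := by omega
      rw [pkRowA_eq_map S w _ hS' hw0 hw1, pkSnapshot_eq_map (pkStepSet reach w S) S]
      apply List.map_congr_left
      intro p hp
      have hpL : p < (S + 1).toNat := List.mem_range.mp hp
      have hwn1 : 1 ≤ w.toNat := by omega
      have hwcast : ((w.toNat : Nat) : Int) = w := Int.toNat_of_nonneg hw0
      rw [contains_eq_mem]
      rcases Bool.eq_false_or_eq_true (pkF (pkSnapshot reach S) w.toNat p) with hb | hb <;>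
        rw [hb]
      · symm
        rw [decide_eq_true_iff]
        obtain ⟨k, hk1, hk2⟩ := (pkF_iff reach S w.toNat hwn1 p hpL).mp hb
        refine (mem_stepSet reach w S _ hwpos).mpr
          ⟨((p - k * w.toNat : Nat) : Int), hk2,
            by exact_mod_cast Nat.sub_le p (k * w.toNat), by omega,
            ⟨(k : Int), ?_⟩⟩
        rw [Nat.cast_sub hk1, Nat.cast_mul, Int.toNat_of_nonneg hw0]
        ring
      · symm
        rw [decide_eq_false_iff_not]
        intro hmem
        obtain ⟨r, hr, h1, h2, c, hc⟩ := (mem_stepSet reach w S _ hwpos).mp hmem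
        have hr0 : 0 ≤ r := (hreach r hr).1
        have hcpos : 0 ≤ c := by nlinarith
        have hmul : ((c.toNat * w.toNat : Nat) : Int) = (p : Int) - r := by
          rw [Nat.cast_mul, Int.toNat_of_nonneg hcpos, Int.toNat_of_nonneg hw0]
          rw [mul_comm]; exact hc.symm
        have hle2 : c.toNat * w.toNat ≤ p := by
          have h3 : ((c.toNat * w.toNat : Nat) : Int) ≤ (p : Int) := by rw [hmul]; omega
          exact_mod_cast h3
        have hpk : pkF (pkSnapshot reach S) w.toNat p = true := by
          rw [pkF_iff reach S w.toNat hwn1 p hpL]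
          refine ⟨c.toNat, hle2, ?_⟩
          have heq : ((p - c.toNat * w.toNat : Nat) : Int) = r := by
            rw [Nat.cast_sub hle2, hmul]; ring
          rw [heq]; exact hr
        rw [hb] at hpk; exact absurd hpk (by simp)

lemma knapsack_single_eq_snapshot (w S : Int) :
    knapsack_single w S = pkSnapshot (pkFirstSet w S) S := by
  unfold knapsack_single pkSnapshot
  apply List.map_congr_left
  intro s hs
  rw [PySem.List.mem_pyRange_one] at hs
  rw [contains_eq_mem]
  rcases h : decide (PySem.Int.mod s w = 0) with _ | _
  · symm
    rw [decide_eq_false_iff_not]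
    intro hmem
    have := ((mem_firstSet w S s).mp hmem).2
    simp only [decide_eq_false_iff_not] at h
    exact h this
  · symm
    rw [decide_eq_true_iff]
    exact (mem_firstSet w S s).mpr ⟨⟨hs.1, hs.2⟩, by simpa using h⟩

lemma pk_outer (S : Int) (ws : List Int) (acc0 : List (List Bool)) (reach : PySem.Set Int)
    (hreach : ∀ x ∈ reach, 0 ≤ x ∧ x ≤ S)
    (hws : ∀ w ∈ ws, S < 0 ∨ (0 ≤ w ∧ w ≤ S + 1)) :
    ws.foldl
      (fun acc w =>
        if acc.length < 1 then acc ++ [knapsack_single w S]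
        else acc ++ [pkRowA (PySem.List.pyGetD acc (-1) []) w S])
      (acc0 ++ [pkSnapshot reach S])
    = (ws.foldl
        (fun (st : List (List Bool) × Option (PySem.Set Int)) w =>
          let r' := match st.2 with
            | none => pkFirstSet w S
            | some r => if w ≠ 0 then pkStepSet r w S else r
          (st.1 ++ [pkSnapshot r' S], some r'))
        (acc0 ++ [pkSnapshot reach S], some reach)).1 := by
  induction ws generalizing acc0 reach with
  | nil => simp
  | cons w ws ih =>
    have hne : ((acc0 ++ [pkSnapshot reach S]).length < 1) = False := by simp
    simp only [List.foldl_cons, hne, if_false, PySem.List.pyGetD_neg_one_append_singleton]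
    rw [step_eq w S reach hreach (hws w (by simp))]
    set reach' := if w ≠ 0 then pkStepSet reach w S else reach with hr'
    have hreach' : ∀ x ∈ reach', 0 ≤ x ∧ x ≤ S := by
      rw [hr']
      split_ifs with hwz
      · rcases hws w (by simp) with h | ⟨h0, h1⟩
        · intro x hx
          -- S < 0: reach is empty (no x satisfies 0 ≤ x ≤ S < 0), so the step set is empty
          exfalso
          have hnil : reach = [] := by
            cases hlst : reach with
            | nil => rfl
            | cons a t =>
              have := hreach a (by rw [hlst]; exact List.mem_cons_self)
              omega
          unfold pkStepSet at hx
          rw [hnil] at hx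
          rw [(PySem.List.sorted_eq_nil_iff ([] : List Int) (fun x => x) false).mpr rfl] at hx
          cases hx
        · exact stepSet_bounds reach w S (by omega) hreach
      · exact hreach
    have := ih (acc0 ++ [pkSnapshot reach S]) reach' hreach'
      (fun x hx => hws x (by simp [hx]))
    simpa using this

-- ===== VERDICT (by name: the statement is the Claim_ definition above) =====
theorem prefix_knapsack_spec : Claim_equal_prefix_knapsack := by
  intro weights S _ hpre
  unfold Spec_prefix_knapsack
  cases weights with
  | nil => rfl
  | cons w0 rest =>
    have hrest : ∀ w ∈ rest, S < 0 ∨ (0 ≤ w ∧ w ≤ S + 1) := by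
      rcases hpre with h | h
      · exact fun w _ => Or.inl h
      · exact fun w hw => Or.inr (h.2 w hw)
    unfold prefix_knapsack prefix_knapsack_alt
    simp only [List.foldl_cons, List.length_nil, if_pos (by norm_num : (0:Nat) < 1)]
    rw [knapsack_single_eq_snapshot w0 S]
    have := pk_outer S rest [] (pkFirstSet w0 S) (firstSet_bounds w0 S) hrest
    simpa using this
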